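-- pv_equiv track=rewrite | github.com/immeritos/leetcode-acm | bfs/bfs5.py | min_total_distance
-- ===== SOURCE A (Python) =====
-- from collections import deque
--
-- def min_total_distance(grid, n, m):
--     has_home = any(1 in row for row in grid)
--     has_station = any(0 in row for row in grid)
--
--     if not has_home or not has_station:
--         return 0
--
--     dist = [[-1] * m for _ in range(n)]
--     q = deque()
--     for i in range(n):
--         for j in range(m):
--             if grid[i][j] == 0:
--                 dist[i][j] = 0
--                 q.append((i, j))
--
--     directions = [(1, 0), (-1, 0), (0, 1), (0, -1)]
--     while q:
--         x, y = q.popleft()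
--         for dx, dy in directions:
--             nx, ny = x + dx, y + dy
--             if 0 <= nx < n and 0 <= ny < m:
--                 if grid[nx][ny] != -1 and dist[nx][ny] == -1:
--                     dist[nx][ny] = dist[x][y] + 1
--                     q.append((nx, ny))
--
--     total = 0
--     for i in range(n):
--         for j in range(m):
--             if grid[i][j] == 1 and dist[i][j] != -1:
--                 total += dist[i][j]
--
--     return total
-- ===== SOURCE B (Python) =====
-- def min_total_distance(grid, n, m):
--     if not any(1 in row for row in grid) or not any(0 in row for row in grid):
--         return 0
--     INF = n * m + 1
--
--     def relaxed(d, i, j):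
--         if grid[i][j] == -1:
--             return d[i][j]
--         best = INF
--         for x, y in ((i + 1, j), (i - 1, j), (i, j + 1), (i, j - 1)):
--             if 0 <= x < n and 0 <= y < m and d[x][y] < best:
--                 best = d[x][y]
--         return best + 1 if best + 1 < d[i][j] else d[i][j]
--
--     dist = [[0 if grid[i][j] == 0 else INF for j in range(m)] for i in range(n)]
--     while True:
--         new = [[relaxed(dist, i, j) for j in range(m)] for i in range(n)]
--         if new == dist:
--             break
--         dist = new
--     return sum(dist[i][j] for i in range(n) for j in range(m)
--                if grid[i][j] == 1 and dist[i][j] < INF)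
-- ===== Notes on version B (the rewrite author's own statement) =====
-- stated objective: alternative
-- what changed: Replaced the queue-based multi-source BFS (deque + incrementally filled distance matrix) by Bellman-Ford-style value iteration: distances start at 0 for stations and n*m+1 (infinity) elsewhere, and whole-grid Jacobi relaxation sweeps (each passable cell takes min(neighbour)+1 if smaller) repeat until the matrix reaches a fixpoint, after which reachable homes' values are summed.
import Mathlib
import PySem

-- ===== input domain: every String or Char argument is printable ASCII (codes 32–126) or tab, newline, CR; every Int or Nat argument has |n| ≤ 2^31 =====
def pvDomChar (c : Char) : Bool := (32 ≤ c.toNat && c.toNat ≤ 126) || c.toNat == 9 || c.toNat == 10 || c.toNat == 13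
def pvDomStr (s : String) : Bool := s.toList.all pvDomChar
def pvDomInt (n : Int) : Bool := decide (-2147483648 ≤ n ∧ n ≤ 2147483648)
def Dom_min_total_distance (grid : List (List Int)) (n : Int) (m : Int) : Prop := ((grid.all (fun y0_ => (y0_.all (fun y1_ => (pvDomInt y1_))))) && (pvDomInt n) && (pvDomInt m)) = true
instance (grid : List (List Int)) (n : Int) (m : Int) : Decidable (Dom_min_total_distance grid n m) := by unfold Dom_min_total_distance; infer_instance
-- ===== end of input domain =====

-- B replaces A's queue-based multi-source BFS by Bellman-Ford-style value iteration:
-- whole-grid Jacobi relaxation sweeps repeated until the distance matrix is a fixpoint.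
-- Same return value; neither version mutates its arguments.

-- ===== PORT A =====
-- shared low-level grid helpers (2-D read/write; indices are nonnegative at every use site)
def pvGet2 (g : List (List Int)) (i j : Int) : Int := (g.getD i.toNat []).getD j.toNat 0
def pvSet2 (g : List (List Int)) (i j : Int) (v : Int) : List (List Int) :=
  g.set i.toNat ((g.getD i.toNat []).set j.toNat v)
def pvDirs : List (Int × Int) := [(1, 0), (-1, 0), (0, 1), (0, -1)]
def pvHasVal (g : List (List Int)) (v : Int) : Bool := g.any (fun row => row.contains v)

-- one popped cell: relax the four neighbours (Python's inner `for dx, dy in directions`)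
def pvStepA (grid : List (List Int)) (n m : Int) (c : Int × Int) (dist : List (List Int)) :
    List (List Int) × List (Int × Int) :=
  pvDirs.foldl (fun st d =>
    let nx := c.1 + d.1
    let ny := c.2 + d.2
    if 0 ≤ nx ∧ nx < n ∧ 0 ≤ ny ∧ ny < m then
      if pvGet2 grid nx ny ≠ -1 ∧ pvGet2 st.1 nx ny = -1 then
        (pvSet2 st.1 nx ny (pvGet2 st.1 c.1 c.2 + 1), st.2 ++ [(nx, ny)])
      else st
    else st) (dist, [])

-- Python's `while q:` loop; the fuel argument only makes the recursion structural
def pvLoopA (grid : List (List Int)) (n m : Int) :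
    Nat → List (Int × Int) → List (List Int) → List (List Int)
  | _, [], dist => dist
  | 0, _ :: _, dist => dist
  | fuel + 1, c :: q, dist =>
      let st := pvStepA grid n m c dist
      pvLoopA grid n m fuel (q ++ st.2) st.1

-- the seeding double loop (`for i in range(n): for j in range(m): …`)
def pvSeedA (grid : List (List Int)) (n m : Int) (dist0 : List (List Int)) :
    List (List Int) × List (Int × Int) :=
  (PySem.List.pyRange 0 n 1).foldl (fun st i =>
    (PySem.List.pyRange 0 m 1).foldl (fun st j =>
      if pvGet2 grid i j = 0 then (pvSet2 st.1 i j 0, st.2 ++ [(i, j)]) else st) st) (dist0, [])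

def min_total_distance (grid : List (List Int)) (n : Int) (m : Int) : Int :=
  let has_home := pvHasVal grid 1
  let has_station := pvHasVal grid 0
  if !has_home || !has_station then 0
  else
    let seeded := pvSeedA grid n m (List.replicate n.toNat (List.replicate m.toNat (-1)))
    let distF := pvLoopA grid n m (seeded.2.length + 2 * (n.toNat * m.toNat)) seeded.2 seeded.1
    (PySem.List.pyRange 0 n 1).foldl (fun total i =>
      (PySem.List.pyRange 0 m 1).foldl (fun total j =>
        if pvGet2 grid i j = 1 ∧ pvGet2 distF i j ≠ -1 then total + pvGet2 distF i j else total)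
        total) 0

-- ===== PORT B =====
-- the four neighbour coordinates of (i, j) (Python's tuple in `relaxed`)
def pvNbrs (i j : Int) : List (Int × Int) := [(i + 1, j), (i - 1, j), (i, j + 1), (i, j - 1)]

-- the body of the `for x, y in …` loop of `relaxed`: keep the smallest in-window value seen
def pvNbrFoldF (M : List (List Int)) (n m : Int) (best : Int) (p : Int × Int) : Int :=
  if 0 ≤ p.1 ∧ p.1 < n ∧ 0 ≤ p.2 ∧ p.2 < m ∧ pvGet2 M p.1 p.2 < best then pvGet2 M p.1 p.2 else best

def pvNbrMin (M : List (List Int)) (n m inf i j : Int) : Int :=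
  (pvNbrs i j).foldl (pvNbrFoldF M n m) inf

-- Python's `relaxed(d, i, j)`
def pvRelaxed (grid M : List (List Int)) (n m inf i j : Int) : Int :=
  if pvGet2 grid i j = -1 then pvGet2 M i j
  else
    let best := pvNbrMin M n m inf i j
    if best + 1 < pvGet2 M i j then best + 1 else pvGet2 M i j

-- one Jacobi sweep: `new = [[relaxed(dist, i, j) for j in range(m)] for i in range(n)]`
def pvSweep (grid : List (List Int)) (n m inf : Int) (M : List (List Int)) : List (List Int) :=
  (PySem.List.pyRange 0 n 1).map (fun i =>
    (PySem.List.pyRange 0 m 1).map (fun j => pvRelaxed grid M n m inf i j))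

-- Python's `while True:` fixpoint loop; fuel only makes the recursion structural
def pvJacobi (grid : List (List Int)) (n m inf : Int) : Nat → List (List Int) → List (List Int)
  | 0, M => M
  | fuel + 1, M =>
      let N := pvSweep grid n m inf M
      if N = M then M else pvJacobi grid n m inf fuel N

def min_total_distance_alt (grid : List (List Int)) (n : Int) (m : Int) : Int :=
  if !pvHasVal grid 1 || !pvHasVal grid 0 then 0
  else
    let inf := n * m + 1
    let M0 := (PySem.List.pyRange 0 n 1).map (fun i =>
      (PySem.List.pyRange 0 m 1).map (fun j => if pvGet2 grid i j = 0 then 0 else inf))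
    let Mf := pvJacobi grid n m inf (n.toNat * m.toNat + 1) M0
    ((PySem.List.pyRange 0 n 1).map (fun i =>
      ((PySem.List.pyRange 0 m 1).map (fun j =>
        if pvGet2 grid i j = 1 ∧ pvGet2 Mf i j < inf then pvGet2 Mf i j else 0)).sum)).sum

-- ===== PRECONDITION & SPEC =====
-- Pre_ excludes exactly the inputs where the Python A raises IndexError: both guards pass, m > 0,
-- and the requested n×m window sticks out of the grid (n > len(grid), or some row among the
-- first n shorter than m). Everywhere else A returns normally.
def Pre_min_total_distance (grid : List (List Int)) (n : Int) (m : Int) : Prop :=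
  (pvHasVal grid 1 = true ∧ pvHasVal grid 0 = true) →
    (m ≤ 0 ∨ (n ≤ (grid.length : Int) ∧ ∀ row ∈ grid.take n.toNat, m ≤ (row.length : Int)))
instance (grid : List (List Int)) (n : Int) (m : Int) : Decidable (Pre_min_total_distance grid n m) := by
  unfold Pre_min_total_distance; infer_instance

def pvWitness_min_total_distance : List (List Int) × Int × Int := ([[0, 1]], 1, 2)

def Spec_min_total_distance (grid : List (List Int)) (n : Int) (m : Int) (out : Int) : Prop := out = min_total_distance_alt grid n m
instance (grid : List (List Int)) (n : Int) (m : Int) (out : Int) : Decidable (Spec_min_total_distance grid n m out) := by unfold Spec_min_total_distance; infer_instance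

-- ===== CLAIM (what is proved, stated in full; the proofs are below) =====
def Claim_equal_min_total_distance : Prop := ∀ (grid : List (List Int)) (n : Int) (m : Int), Dom_min_total_distance grid n m → Pre_min_total_distance grid n m → Spec_min_total_distance grid n m (min_total_distance grid n m)

-- ===== LEMMAS AND PROOFS =====

-- proof-only vocabulary
def pvWin (n m : Int) (c : Int × Int) : Prop := 0 ≤ c.1 ∧ c.1 < n ∧ 0 ≤ c.2 ∧ c.2 < m

def pvWinL (n m : Int) : List (Int × Int) :=
  (PySem.List.pyRange 0 n 1).flatMap (fun i => (PySem.List.pyRange 0 m 1).map (fun j => (i, j)))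

def pvShape (n m : Int) (dist : List (List Int)) : Prop :=
  dist.length = n.toNat ∧ ∀ row ∈ dist, row.length = m.toNat

def pvAdj (c w : Int × Int) : Prop := ∃ dir ∈ pvDirs, w = (c.1 + dir.1, c.2 + dir.2)

def pvUc (n m : Int) (dist : List (List Int)) : Int :=
  ((pvWinL n m).map (fun w => if pvGet2 dist w.1 w.2 = -1 then (1 : Int) else 0)).sum

-- A's queue processing of a whole level, threaded cell by cell
def pvSeqA (grid : List (List Int)) (n m : Int) :
    List (Int × Int) → List (List Int) → List (List Int) × List (Int × Int)
  | [], dist => (dist, [])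
  | c :: F, dist =>
      let st := pvStepA grid n m c dist
      let r := pvSeqA grid n m F st.1
      (r.1, st.2 ++ r.2)

-- the per-direction loop body of A, named so the characterisation lemma can speak about it
def pvABody (grid : List (List Int)) (n m : Int) (c : Int × Int)
    (st : List (List Int) × List (Int × Int)) (d : Int × Int) : List (List Int) × List (Int × Int) :=
  let nx := c.1 + d.1
  let ny := c.2 + d.2
  if 0 ≤ nx ∧ nx < n ∧ 0 ≤ ny ∧ ny < m then
    if pvGet2 grid nx ny ≠ -1 ∧ pvGet2 st.1 nx ny = -1 then
      (pvSet2 st.1 nx ny (pvGet2 st.1 c.1 c.2 + 1), st.2 ++ [(nx, ny)])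
    else st
  else st

-- the BFS ↔ value-iteration correspondence invariant
def pvRel (grid : List (List Int)) (n m inf d : Int) (dist M : List (List Int))
    (F : List (Int × Int)) : Prop :=
  pvShape n m dist ∧ pvShape n m M ∧ 0 ≤ d ∧
  (∀ c ∈ F, pvWin n m c) ∧
  (∀ w : Int × Int, pvWin n m w →
     (pvGet2 dist w.1 w.2 = -1 ∧ pvGet2 M w.1 w.2 = inf) ∨
     (0 ≤ pvGet2 dist w.1 w.2 ∧ pvGet2 dist w.1 w.2 ≤ d ∧
      pvGet2 M w.1 w.2 = pvGet2 dist w.1 w.2 ∧ pvGet2 grid w.1 w.2 ≠ -1)) ∧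
  (∀ w : Int × Int, pvWin n m w → (pvGet2 dist w.1 w.2 = d ↔ w ∈ F)) ∧
  (∀ v : Int × Int, pvWin n m v → 0 ≤ pvGet2 dist v.1 v.2 → pvGet2 dist v.1 v.2 < d →
     ∀ w : Int × Int, pvAdj v w → pvWin n m w → pvGet2 grid w.1 w.2 ≠ -1 →
       0 ≤ pvGet2 dist w.1 w.2 ∧ pvGet2 dist w.1 w.2 ≤ pvGet2 dist v.1 v.2 + 1)

lemma pvStepA_eq_foldl (grid : List (List Int)) (n m : Int) (c : Int × Int) (dist : List (List Int)) :
    pvStepA grid n m c dist = pvDirs.foldl (pvABody grid n m c) (dist, []) := rfl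

lemma pv_winL_eq_product (n m : Int) :
    pvWinL n m = (PySem.List.pyRange 0 n 1) ×ˢ (PySem.List.pyRange 0 m 1) := rfl

lemma pv_mem_winL (n m : Int) (c : Int × Int) : c ∈ pvWinL n m ↔ pvWin n m c := by
  obtain ⟨a, b⟩ := c
  rw [pv_winL_eq_product]
  simp [List.mem_product, PySem.List.mem_pyRange_one, pvWin]
  tauto

lemma pv_nodup_winL (n m : Int) : (pvWinL n m).Nodup := by
  rw [pv_winL_eq_product]
  exact List.Nodup.product (PySem.List.nodup_pyRange_one 0 n) (PySem.List.nodup_pyRange_one 0 m)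

lemma pv_length_winL (n m : Int) : (pvWinL n m).length = n.toNat * m.toNat := by
  rw [pv_winL_eq_product]
  simp [List.length_product, PySem.List.length_pyRange_one]

lemma pv_foldl2 {σ : Type} (n m : Int) (f : σ → (Int × Int) → σ) (init : σ) :
    (PySem.List.pyRange 0 n 1).foldl (fun st i =>
      (PySem.List.pyRange 0 m 1).foldl (fun st j => f st (i, j)) st) init
    = (pvWinL n m).foldl f init := by
  rw [pvWinL, List.foldl_flatMap]
  simp [List.foldl_map]

lemma pv_sum_split (L : List (Int × Int)) (f g h : (Int × Int) → Int)
    (hp : ∀ w ∈ L, f w = g w + h w) :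
    (L.map f).sum = (L.map g).sum + (L.map h).sum := by
  rw [List.map_congr_left hp]
  exact PySem.List.sum_map_add_int L g h

lemma pv_sum_if_filter (L : List (Int × Int)) (F : List (Int × Int)) (g : (Int × Int) → Int) :
    (L.map (fun w => if w ∈ F then g w else 0)).sum = ((L.filter (fun w => decide (w ∈ F))).map g).sum := by
  induction L with
  | nil => simp
  | cons x L ih =>
      by_cases hx : x ∈ F <;> simp [hx, ih]

lemma pv_sum_indicator (L F : List (Int × Int)) (g : (Int × Int) → Int)
    (hL : L.Nodup) (hF : F.Nodup) (hsub : ∀ c ∈ F, c ∈ L) :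
    (L.map (fun w => if w ∈ F then g w else 0)).sum = (F.map g).sum := by
  rw [pv_sum_if_filter]
  have hperm : (L.filter (fun w => decide (w ∈ F))).Perm F := by
    refine (List.perm_ext_iff_of_nodup (hL.filter _) hF).mpr ?_
    intro a
    simp only [List.mem_filter, decide_eq_true_eq]
    exact ⟨fun ha => ha.2, fun ha => ⟨hsub a ha, ha⟩⟩
  exact (hperm.map g).sum_eq

lemma pv_uc_nonneg (n m : Int) (dist : List (List Int)) : 0 ≤ pvUc n m dist := by
  apply List.sum_nonneg
  intro x hx
  simp only [List.mem_map] at hx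
  obtain ⟨w, -, rfl⟩ := hx
  split <;> omega

lemma pv_uc_le (n m : Int) (dist : List (List Int)) :
    pvUc n m dist ≤ ((n.toNat * m.toNat : Nat) : Int) := by
  have h := List.sum_le_card_nsmul
    ((pvWinL n m).map (fun w => if pvGet2 dist w.1 w.2 = -1 then (1 : Int) else 0)) 1 ?_
  · simpa [pvUc, pv_length_winL, nsmul_eq_mul] using h
  · intro x hx
    simp only [List.mem_map] at hx
    obtain ⟨w, -, rfl⟩ := hx
    split <;> omega

lemma pv_uc_pos (n m : Int) (dist : List (List Int)) (w : Int × Int)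
    (hw : pvWin n m w) (hu : pvGet2 dist w.1 w.2 = -1) : 1 ≤ pvUc n m dist := by
  have hmem : (1 : Int) ∈ (pvWinL n m).map (fun w => if pvGet2 dist w.1 w.2 = -1 then (1 : Int) else 0) := by
    refine List.mem_map.mpr ⟨w, (pv_mem_winL n m w).mpr hw, by simp [hu]⟩
  refine List.single_le_sum ?_ 1 hmem
  intro x hx
  simp only [List.mem_map] at hx
  obtain ⟨v, -, rfl⟩ := hx
  split <;> omega

lemma pv_toNat_lt (i n : Int) (h0 : 0 ≤ i) (h1 : i < n) : i.toNat < n.toNat := by omega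

lemma pv_getD_row (g : List (List Int)) (k : Nat) (h : k < g.length) : g.getD k [] = g[k] := by
  simp [List.getD, List.getElem?_eq_getElem h]

lemma pv_shape_set2 (g : List (List Int)) (n m : Int) (i j v : Int)
    (hs : pvShape n m g) (hw : pvWin n m (i, j)) : pvShape n m (pvSet2 g i j v) := by
  obtain ⟨hlen, hrow⟩ := hs
  obtain ⟨h1, h2, h3, h4⟩ := hw
  have hi : i.toNat < g.length := by rw [hlen]; exact pv_toNat_lt _ _ h1 h2
  constructor
  · simp [pvSet2, hlen]
  · intro row hrmem
    rcases List.mem_or_eq_of_mem_set hrmem with h | h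
    · exact hrow _ h
    · subst h
      rw [List.length_set, pv_getD_row _ _ hi]
      exact hrow _ (List.getElem_mem hi)

lemma pv_get2_set2_self (g : List (List Int)) (n m : Int) (i j v : Int)
    (hs : pvShape n m g) (hw : pvWin n m (i, j)) : pvGet2 (pvSet2 g i j v) i j = v := by
  obtain ⟨hlen, hrow⟩ := hs
  obtain ⟨h1, h2, h3, h4⟩ := hw
  have hi : i.toNat < g.length := by rw [hlen]; exact pv_toNat_lt _ _ h1 h2
  have hj : j.toNat < (g[i.toNat]).length := by
    rw [hrow _ (List.getElem_mem hi)]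
    exact pv_toNat_lt _ _ h3 h4
  simp [pvGet2, pvSet2, List.getD, List.getElem?_set_self hi, List.getElem?_eq_getElem hi,
    List.getElem?_set_self hj]

lemma pv_get2_set2_ne (g : List (List Int)) (n m : Int) (i j v i' j' : Int)
    (hs : pvShape n m g) (hw : pvWin n m (i, j)) (hw' : pvWin n m (i', j'))
    (hne : (i', j') ≠ (i, j)) : pvGet2 (pvSet2 g i j v) i' j' = pvGet2 g i' j' := by
  obtain ⟨hlen, hrow⟩ := hs
  obtain ⟨h1, h2, h3, h4⟩ := hw
  obtain ⟨h1', h2', h3', h4'⟩ := hw'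
  simp only [pvGet2, pvSet2]
  by_cases hii : i'.toNat = i.toNat
  · have hieq : i' = i := by omega
    have hjj : j'.toNat ≠ j.toNat := by
      have : j' ≠ j := fun hj => hne (by rw [hieq, hj])
      omega
    have hi : i.toNat < g.length := by rw [hlen]; exact pv_toNat_lt _ _ h1 h2
    rw [hii]
    simp [List.getD, List.getElem?_set_self hi, List.getElem?_set_ne (Ne.symm hjj)]
  · simp [List.getD, List.getElem?_set_ne (Ne.symm hii)]

lemma pv_get2_replicate (n m : Int) (w : Int × Int) (hw : pvWin n m w) :
    pvGet2 (List.replicate n.toNat (List.replicate m.toNat (-1))) w.1 w.2 = -1 := by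
  obtain ⟨h1, h2, h3, h4⟩ := hw
  have hi : w.1.toNat < n.toNat := pv_toNat_lt _ _ h1 h2
  have hj : w.2.toNat < m.toNat := pv_toNat_lt _ _ h3 h4
  simp [pvGet2, List.getD, hi, hj]

lemma pv_shape_replicate (n m : Int) :
    pvShape n m (List.replicate n.toNat (List.replicate m.toNat (-1))) := by
  constructor
  · simp
  · intro row hr
    rw [List.eq_of_mem_replicate hr]
    simp

lemma pv_adj_symm (c w : Int × Int) (h : pvAdj c w) : pvAdj w c := by
  obtain ⟨dir, hdir, he⟩ := h
  subst he
  simp only [pvDirs, List.mem_cons, List.not_mem_nil, or_false] at hdir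
  rcases hdir with h | h | h | h <;> subst h
  · exact ⟨(-1, 0), by simp [pvDirs], by simp⟩
  · exact ⟨(1, 0), by simp [pvDirs], by simp⟩
  · exact ⟨(0, -1), by simp [pvDirs], by simp⟩
  · exact ⟨(0, 1), by simp [pvDirs], by simp⟩

lemma pv_mem_nbrs (i j : Int) (v : Int × Int) : v ∈ pvNbrs i j ↔ pvAdj (i, j) v := by
  simp only [pvNbrs, pvAdj, pvDirs, List.mem_cons, List.not_mem_nil, or_false]
  constructor
  · rintro (h | h | h | h) <;> subst h
    · exact ⟨(1, 0), Or.inl rfl, by simp⟩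
    · exact ⟨(-1, 0), Or.inr (Or.inl rfl), Prod.ext (by simp; ring) (by simp)⟩
    · exact ⟨(0, 1), Or.inr (Or.inr (Or.inl rfl)), by simp⟩
    · exact ⟨(0, -1), Or.inr (Or.inr (Or.inr rfl)), Prod.ext (by simp) (by simp; ring)⟩
  · rintro ⟨dir, (h | h | h | h), he⟩ <;> subst h <;> subst he <;> simp <;> omega

-- characterisation of A's per-cell neighbour loop
lemma pv_dirsChar (grid : List (List Int)) (n m : Int) (c : Int × Int) (dval : Int) :
    ∀ (ds : List (Int × Int)), (∀ dir ∈ ds, dir ≠ ((0 : Int), (0 : Int))) →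
    ∀ (dist : List (List Int)) (nwA : List (Int × Int)),
    pvShape n m dist → pvWin n m c → pvGet2 dist c.1 c.2 = dval → 0 ≤ dval →
    ∃ ws : List (Int × Int),
      (ds.foldl (pvABody grid n m c) (dist, nwA)).2 = nwA ++ ws ∧
      pvShape n m (ds.foldl (pvABody grid n m c) (dist, nwA)).1 ∧
      ws.Nodup ∧
      (∀ w ∈ ws, pvWin n m w ∧ pvGet2 grid w.1 w.2 ≠ -1 ∧ pvGet2 dist w.1 w.2 = -1 ∧
        ∃ dir ∈ ds, w = (c.1 + dir.1, c.2 + dir.2)) ∧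
      (∀ w : Int × Int, pvWin n m w →
        pvGet2 (ds.foldl (pvABody grid n m c) (dist, nwA)).1 w.1 w.2
          = if w ∈ ws then dval + 1 else pvGet2 dist w.1 w.2) ∧
      (∀ dir ∈ ds, pvWin n m (c.1 + dir.1, c.2 + dir.2) →
        pvGet2 grid (c.1 + dir.1) (c.2 + dir.2) ≠ -1 →
        pvGet2 (ds.foldl (pvABody grid n m c) (dist, nwA)).1 (c.1 + dir.1) (c.2 + dir.2) ≠ -1) := by
  intro ds
  induction ds with
  | nil =>
      intro _ dist nwA hsh hc hval hd
      exact ⟨[], by simp, hsh, by simp, by simp, fun w _ => by simp, by simp⟩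
  | cons dir ds ih =>
      intro hds dist nwA hsh hc hval hd
      have hdir : dir ≠ ((0 : Int), (0 : Int)) := hds dir (by simp)
      have hds' : ∀ d ∈ ds, d ≠ ((0 : Int), (0 : Int)) := fun d hd' => hds d (by simp [hd'])
      simp only [List.foldl_cons]
      by_cases hb : 0 ≤ c.1 + dir.1 ∧ c.1 + dir.1 < n ∧ 0 ≤ c.2 + dir.2 ∧ c.2 + dir.2 < m
      · have hwin0 : pvWin n m (c.1 + dir.1, c.2 + dir.2) := hb
        by_cases hg : pvGet2 grid (c.1 + dir.1) (c.2 + dir.2) ≠ -1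
        · by_cases hdv : pvGet2 dist (c.1 + dir.1) (c.2 + dir.2) = -1
          · -- the neighbour is taken
            have hA : pvABody grid n m c (dist, nwA) dir
                = (pvSet2 dist (c.1 + dir.1) (c.2 + dir.2) (pvGet2 dist c.1 c.2 + 1),
                   nwA ++ [(c.1 + dir.1, c.2 + dir.2)]) := by
              simp only [pvABody]
              rw [if_pos hb, if_pos ⟨hg, hdv⟩]
            rw [hA, hval]
            have hne0 : ((c.1 + dir.1, c.2 + dir.2) : Int × Int) ≠ c := by
              intro h
              apply hdir
              have h1 : c.1 + dir.1 = c.1 := congrArg Prod.fst h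
              have h2 : c.2 + dir.2 = c.2 := congrArg Prod.snd h
              exact Prod.ext (by omega) (by omega)
            have hsh1 : pvShape n m (pvSet2 dist (c.1 + dir.1) (c.2 + dir.2) (dval + 1)) :=
              pv_shape_set2 dist n m _ _ _ hsh hwin0
            have hget0 : pvGet2 (pvSet2 dist (c.1 + dir.1) (c.2 + dir.2) (dval + 1))
                (c.1 + dir.1) (c.2 + dir.2) = dval + 1 :=
              pv_get2_set2_self dist n m _ _ _ hsh hwin0
            have hgetne : ∀ w : Int × Int, pvWin n m w → w ≠ (c.1 + dir.1, c.2 + dir.2) →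
                pvGet2 (pvSet2 dist (c.1 + dir.1) (c.2 + dir.2) (dval + 1)) w.1 w.2
                  = pvGet2 dist w.1 w.2 := by
              intro w hw hwne
              exact pv_get2_set2_ne dist n m _ _ _ w.1 w.2 hsh hwin0 hw hwne
            have hval1 : pvGet2 (pvSet2 dist (c.1 + dir.1) (c.2 + dir.2) (dval + 1)) c.1 c.2 = dval := by
              have := hgetne c hc (fun h => hne0 h.symm)
              rw [this, hval]
            obtain ⟨ws', h1, h2, h3, h4, h5, h6⟩ :=
              ih hds' (pvSet2 dist (c.1 + dir.1) (c.2 + dir.2) (dval + 1))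
                (nwA ++ [(c.1 + dir.1, c.2 + dir.2)]) hsh1 hc hval1 hd
            have hw0nmem : ((c.1 + dir.1, c.2 + dir.2) : Int × Int) ∉ ws' := by
              intro hmem
              have := (h4 _ hmem).2.2.1
              rw [hget0] at this
              omega
            refine ⟨(c.1 + dir.1, c.2 + dir.2) :: ws', ?_, h2, ?_, ?_, ?_, ?_⟩
            · rw [h1]; simp
            · exact List.nodup_cons.mpr ⟨hw0nmem, h3⟩
            · intro w hw
              rcases List.mem_cons.mp hw with h | h
              · subst h; exact ⟨hwin0, hg, hdv, ⟨dir, by simp, rfl⟩⟩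
              · obtain ⟨hwwin, hwg, hwv, hdir'⟩ := h4 w h
                refine ⟨hwwin, hwg, ?_, ?_⟩
                · have hwne : w ≠ ((c.1 + dir.1, c.2 + dir.2) : Int × Int) := by
                    intro he
                    rw [he, hget0] at hwv
                    omega
                  rw [hgetne w hwwin hwne] at hwv
                  exact hwv
                · obtain ⟨dir', hd', he'⟩ := hdir'
                  exact ⟨dir', by simp [hd'], he'⟩
            · intro w hwwin
              rw [h5 w hwwin]
              by_cases hmem : w ∈ ws'
              · rw [if_pos hmem, if_pos (List.mem_cons.mpr (Or.inr hmem))]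
              · rw [if_neg hmem]
                by_cases hw0 : w = ((c.1 + dir.1, c.2 + dir.2) : Int × Int)
                · subst hw0
                  rw [hget0, if_pos (List.mem_cons.mpr (Or.inl rfl))]
                · rw [hgetne w hwwin hw0,
                    if_neg (fun hmem' => (List.mem_cons.mp hmem').elim hw0 hmem)]
            · intro dir' hdir' hwwin hgg
              rcases List.mem_cons.mp hdir' with h | h
              · subst h
                rw [h5 _ hwwin]
                by_cases hmem : ((c.1 + dir'.1, c.2 + dir'.2) : Int × Int) ∈ ws'
                · rw [if_pos hmem]; omega
                · rw [if_neg hmem, hget0]; omega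
              · exact h6 dir' h hwwin hgg
          · -- already discovered: skipped, stays discovered
            have hA : pvABody grid n m c (dist, nwA) dir = (dist, nwA) := by
              simp only [pvABody]
              rw [if_pos hb, if_neg (fun h => hdv h.2)]
            rw [hA]
            obtain ⟨ws', h1, h2, h3, h4, h5, h6⟩ := ih hds' dist nwA hsh hc hval hd
            refine ⟨ws', h1, h2, h3, ?_, h5, ?_⟩
            · intro w hw
              obtain ⟨a, b', c', ⟨dir', hd', he'⟩⟩ := h4 w hw
              exact ⟨a, b', c', ⟨dir', by simp [hd'], he'⟩⟩
            · intro dir' hdir' hwwin hgg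
              rcases List.mem_cons.mp hdir' with h | h
              · subst h
                rw [h5 _ hwwin]
                by_cases hmem : ((c.1 + dir'.1, c.2 + dir'.2) : Int × Int) ∈ ws'
                · rw [if_pos hmem]; omega
                · rw [if_neg hmem]; exact hdv
              · exact h6 dir' h hwwin hgg
        · -- wall: skipped; completeness for this direction is vacuous
          have hA : pvABody grid n m c (dist, nwA) dir = (dist, nwA) := by
            simp only [pvABody]
            rw [if_pos hb, if_neg (fun h => hg h.1)]
          rw [hA]
          obtain ⟨ws', h1, h2, h3, h4, h5, h6⟩ := ih hds' dist nwA hsh hc hval hd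
          refine ⟨ws', h1, h2, h3, ?_, h5, ?_⟩
          · intro w hw
            obtain ⟨a, b', c', ⟨dir', hd', he'⟩⟩ := h4 w hw
            exact ⟨a, b', c', ⟨dir', by simp [hd'], he'⟩⟩
          · intro dir' hdir' hwwin hgg
            rcases List.mem_cons.mp hdir' with h | h
            · subst h; exact absurd hgg hg
            · exact h6 dir' h hwwin hgg
      · -- out of bounds: skipped; completeness vacuous
        have hA : pvABody grid n m c (dist, nwA) dir = (dist, nwA) := by
          simp only [pvABody]
          rw [if_neg hb]
        rw [hA]
        obtain ⟨ws', h1, h2, h3, h4, h5, h6⟩ := ih hds' dist nwA hsh hc hval hd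
        refine ⟨ws', h1, h2, h3, ?_, h5, ?_⟩
        · intro w hw
          obtain ⟨a, b', c', ⟨dir', hd', he'⟩⟩ := h4 w hw
          exact ⟨a, b', c', ⟨dir', by simp [hd'], he'⟩⟩
        · intro dir' hdir' hwwin hgg
          rcases List.mem_cons.mp hdir' with h | h
          · subst h; exact absurd hwwin hb
          · exact h6 dir' h hwwin hgg

-- characterisation of A's processing of a whole level
lemma pv_seqChar (grid : List (List Int)) (n m d : Int) :
    ∀ (F : List (Int × Int)) (dist : List (List Int)),
    pvShape n m dist → (∀ c ∈ F, pvWin n m c ∧ pvGet2 dist c.1 c.2 = d) → 0 ≤ d →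
    ∃ ws : List (Int × Int),
      (pvSeqA grid n m F dist).2 = ws ∧
      pvShape n m (pvSeqA grid n m F dist).1 ∧
      ws.Nodup ∧
      (∀ w ∈ ws, pvWin n m w ∧ pvGet2 grid w.1 w.2 ≠ -1 ∧ pvGet2 dist w.1 w.2 = -1 ∧
        ∃ c ∈ F, pvAdj c w) ∧
      (∀ w : Int × Int, pvWin n m w →
        pvGet2 (pvSeqA grid n m F dist).1 w.1 w.2
          = if w ∈ ws then d + 1 else pvGet2 dist w.1 w.2) ∧
      (∀ c ∈ F, ∀ w : Int × Int, pvAdj c w → pvWin n m w → pvGet2 grid w.1 w.2 ≠ -1 →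
        pvGet2 (pvSeqA grid n m F dist).1 w.1 w.2 ≠ -1) := by
  intro F
  induction F with
  | nil =>
      intro dist hsh _ hd
      exact ⟨[], rfl, hsh, by simp, by simp, fun w _ => by simp [pvSeqA], by simp⟩
  | cons c F ih =>
      intro dist hsh hF hd
      obtain ⟨hcwin, hcval⟩ := hF c (by simp)
      have hF' : ∀ x ∈ F, pvWin n m x ∧ pvGet2 dist x.1 x.2 = d := fun x hx => hF x (by simp [hx])
      have hdirs : ∀ dir ∈ pvDirs, dir ≠ ((0 : Int), (0 : Int)) := by decide
      obtain ⟨ws0, a1, a2, a3, a4, a5, a6⟩ :=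
        pv_dirsChar grid n m c d pvDirs hdirs dist [] hsh hcwin hcval hd
      have hstA : pvStepA grid n m c dist = pvDirs.foldl (pvABody grid n m c) (dist, []) :=
        pvStepA_eq_foldl grid n m c dist
      have hstepA2 : (pvStepA grid n m c dist).2 = ws0 := by rw [hstA]; simpa using a1
      have hsh1 : pvShape n m (pvStepA grid n m c dist).1 := by rw [hstA]; exact a2
      have hpt0 : ∀ w : Int × Int, pvWin n m w →
          pvGet2 (pvStepA grid n m c dist).1 w.1 w.2
            = if w ∈ ws0 then d + 1 else pvGet2 dist w.1 w.2 := by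
        intro w hw; rw [hstA]; exact a5 w hw
      have hF1 : ∀ x ∈ F, pvWin n m x ∧ pvGet2 (pvStepA grid n m c dist).1 x.1 x.2 = d := by
        intro x hx
        obtain ⟨hxw, hxv⟩ := hF' x hx
        refine ⟨hxw, ?_⟩
        rw [hpt0 x hxw]
        have hxnot : x ∉ ws0 := by
          intro hmem
          have := (a4 x hmem).2.2.1
          omega
        rw [if_neg hxnot]
        exact hxv
      obtain ⟨ws1, b1, b2, b3, b4, b5, b6⟩ := ih (pvStepA grid n m c dist).1 hsh1 hF1 hd
      have hseq1 : (pvSeqA grid n m (c :: F) dist).1 = (pvSeqA grid n m F (pvStepA grid n m c dist).1).1 := rfl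
      have hseq2 : (pvSeqA grid n m (c :: F) dist).2
          = (pvStepA grid n m c dist).2 ++ (pvSeqA grid n m F (pvStepA grid n m c dist).1).2 := rfl
      have hdisj : ws0.Disjoint ws1 := by
        intro w hw0 hw1
        have h1 := (b4 w hw1).2.2.1
        have hwin := (a4 w hw0).1
        rw [hpt0 w hwin, if_pos hw0] at h1
        omega
      refine ⟨ws0 ++ ws1, ?_, ?_, ?_, ?_, ?_, ?_⟩
      · rw [hseq2, hstepA2, b1]
      · rw [hseq1]; exact b2
      · exact List.nodup_append.mpr ⟨a3, b3, List.disjoint_iff_ne.mp hdisj⟩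
      · intro w hw
        rcases List.mem_append.mp hw with h | h
        · obtain ⟨hwin, hg, hv, ⟨dir, hdm, he⟩⟩ := a4 w h
          exact ⟨hwin, hg, hv, ⟨c, by simp, ⟨dir, hdm, he⟩⟩⟩
        · obtain ⟨hwin, hg, hv, ⟨c', hc', hadj⟩⟩ := b4 w h
          rw [hpt0 w hwin] at hv
          by_cases hmem : w ∈ ws0
          · rw [if_pos hmem] at hv; omega
          · rw [if_neg hmem] at hv
            exact ⟨hwin, hg, hv, ⟨c', by simp [hc'], hadj⟩⟩
      · intro w hwin
        rw [hseq1, b5 w hwin]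
        by_cases h1 : w ∈ ws1
        · rw [if_pos h1, if_pos (List.mem_append.mpr (Or.inr h1))]
        · rw [if_neg h1, hpt0 w hwin]
          by_cases h0 : w ∈ ws0
          · rw [if_pos h0, if_pos (List.mem_append.mpr (Or.inl h0))]
          · rw [if_neg h0, if_neg (fun hm => (List.mem_append.mp hm).elim h0 h1)]
      · intro c' hc' w hadj hwwin hgg
        rw [hseq1]
        rcases List.mem_cons.mp hc' with h | h
        · subst h
          obtain ⟨dir, hdm, he⟩ := hadj
          subst he
          have hne : pvGet2 (pvStepA grid n m c' dist).1 (c'.1 + dir.1) (c'.2 + dir.2) ≠ -1 := by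
            rw [hstA]; exact a6 dir hdm hwwin hgg
          rw [b5 _ hwwin]
          by_cases hmem : ((c'.1 + dir.1, c'.2 + dir.2) : Int × Int) ∈ ws1
          · rw [if_pos hmem]; omega
          · rw [if_neg hmem]; exact hne
        · exact b6 c' h w hadj hwwin hgg

-- the count of undiscovered cells drops by the size of the new frontier
lemma pv_uc_step (n m : Int) (dist distS : List (List Int)) (ws : List (Int × Int)) (d : Int)
    (hd : 0 ≤ d) (hnd : ws.Nodup)
    (hws : ∀ w ∈ ws, pvWin n m w ∧ pvGet2 dist w.1 w.2 = -1)
    (hpt : ∀ w : Int × Int, pvWin n m w →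
      pvGet2 distS w.1 w.2 = if w ∈ ws then d + 1 else pvGet2 dist w.1 w.2) :
    pvUc n m distS = pvUc n m dist - ws.length := by
  have key : ∀ w ∈ pvWinL n m,
      (if pvGet2 dist w.1 w.2 = -1 then (1 : Int) else 0)
        = (if pvGet2 distS w.1 w.2 = -1 then (1 : Int) else 0) + (if w ∈ ws then (1 : Int) else 0) := by
    intro w hw
    have hwin := (pv_mem_winL n m w).mp hw
    have hS := hpt w hwin
    by_cases hmem : w ∈ ws
    · have hdist := (hws w hmem).2
      have hne : d + 1 ≠ -1 := by omega
      simp [hmem, hdist, hS, hne]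
    · rw [if_neg hmem] at hS
      simp [hmem, hS]
  have hsplit := pv_sum_split (pvWinL n m) _ _ _ key
  rw [pv_sum_indicator (pvWinL n m) ws _ (pv_nodup_winL n m) hnd
    (fun c hc => (pv_mem_winL n m c).mpr (hws c hc).1)] at hsplit
  rw [PySem.List.sum_map_const_int] at hsplit
  unfold pvUc at *
  omega

-- A's queue loop processes a level block exactly as pvSeqA does
lemma pv_reorder (grid : List (List Int)) (n m : Int) :
    ∀ (F : List (Int × Int)) (R : List (Int × Int)) (dist : List (List Int)) (fa : Nat),
    F.length ≤ fa →
    pvLoopA grid n m fa (F ++ R) dist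
      = pvLoopA grid n m (fa - F.length) (R ++ (pvSeqA grid n m F dist).2) (pvSeqA grid n m F dist).1 := by
  intro F
  induction F with
  | nil => intro R dist fa h; simp [pvSeqA]
  | cons c F ih =>
      intro R dist fa h
      cases fa with
      | zero => simp at h
      | succ fa' =>
          have hstep : pvLoopA grid n m (fa' + 1) ((c :: F) ++ R) dist
              = pvLoopA grid n m fa' ((F ++ R) ++ (pvStepA grid n m c dist).2) (pvStepA grid n m c dist).1 := rfl
          rw [hstep, List.append_assoc,
            ih (R ++ (pvStepA grid n m c dist).2) (pvStepA grid n m c dist).1 fa' (by simpa using h)]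
          simp only [pvSeqA]
          rw [List.append_assoc]
          congr 1
          simp

-- the seeding loop, characterised pointwise
lemma pv_seedChar (grid : List (List Int)) (n m : Int) :
    ∀ (L : List (Int × Int)), (∀ c ∈ L, pvWin n m c) →
    ∀ (dist : List (List Int)) (q : List (Int × Int)), pvShape n m dist →
    pvShape n m (L.foldl (fun st c => if pvGet2 grid c.1 c.2 = 0 then (pvSet2 st.1 c.1 c.2 0, st.2 ++ [c]) else st) (dist, q)).1 ∧
    (L.foldl (fun st c => if pvGet2 grid c.1 c.2 = 0 then (pvSet2 st.1 c.1 c.2 0, st.2 ++ [c]) else st) (dist, q)).2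
      = q ++ L.filter (fun c => pvGet2 grid c.1 c.2 == 0) ∧
    (∀ w : Int × Int, pvWin n m w →
      pvGet2 (L.foldl (fun st c => if pvGet2 grid c.1 c.2 = 0 then (pvSet2 st.1 c.1 c.2 0, st.2 ++ [c]) else st) (dist, q)).1 w.1 w.2
        = if w ∈ L ∧ pvGet2 grid w.1 w.2 = 0 then 0 else pvGet2 dist w.1 w.2) := by
  intro L
  induction L with
  | nil =>
      intro _ dist q hsh
      exact ⟨hsh, by simp, fun w _ => by simp⟩
  | cons c L ih =>
      intro hLw dist q hsh
      have hcwin : pvWin n m c := hLw c (by simp)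
      have hLw' : ∀ x ∈ L, pvWin n m x := fun x hx => hLw x (by simp [hx])
      simp only [List.foldl_cons]
      by_cases hg : pvGet2 grid c.1 c.2 = 0
      · rw [if_pos hg]
        obtain ⟨i1, i2, i3⟩ := ih hLw' (pvSet2 dist c.1 c.2 0) (q ++ [c])
          (pv_shape_set2 dist n m c.1 c.2 0 hsh hcwin)
        refine ⟨i1, ?_, ?_⟩
        · rw [i2, List.filter_cons_of_pos (by simp [hg]), List.append_assoc]
          rfl
        · intro w hw
          rw [i3 w hw]
          by_cases hmem : w ∈ L ∧ pvGet2 grid w.1 w.2 = 0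
          · rw [if_pos hmem, if_pos ⟨by simp [hmem.1], hmem.2⟩]
          · rw [if_neg hmem]
            by_cases hwc : w = c
            · subst hwc
              rw [pv_get2_set2_self dist n m w.1 w.2 0 hsh hcwin, if_pos ⟨by simp, hg⟩]
            · rw [pv_get2_set2_ne dist n m c.1 c.2 0 w.1 w.2 hsh hcwin hw hwc]
              rw [if_neg (fun h => hmem ⟨(List.mem_cons.mp h.1).resolve_left hwc, h.2⟩)]
      · rw [if_neg hg]
        obtain ⟨i1, i2, i3⟩ := ih hLw' dist q hsh
        refine ⟨i1, ?_, ?_⟩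
        · rw [i2, List.filter_cons_of_neg (by simp [hg])]
        · intro w hw
          rw [i3 w hw]
          by_cases hmem : w ∈ L ∧ pvGet2 grid w.1 w.2 = 0
          · rw [if_pos hmem, if_pos ⟨by simp [hmem.1], hmem.2⟩]
          · rw [if_neg hmem]
            by_cases hwc : w = c
            · subst hwc
              rw [if_neg (fun h => hg h.2)]
            · rw [if_neg (fun h => hmem ⟨(List.mem_cons.mp h.1).resolve_left hwc, h.2⟩)]

-- reading an entry of a [[f i j for j] for i] comprehension
lemma pv_get2_mapmap (f : Int → Int → Int) (n m : Int) (w : Int × Int) (hw : pvWin n m w) :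
    pvGet2 ((PySem.List.pyRange 0 n 1).map (fun i => (PySem.List.pyRange 0 m 1).map (fun j => f i j))) w.1 w.2
      = f w.1 w.2 := by
  obtain ⟨h1, h2, h3, h4⟩ := hw
  have hi : w.1.toNat < (PySem.List.pyRange 0 n 1).length := by
    rw [PySem.List.length_pyRange_one]; omega
  have hi' : w.1.toNat < ((PySem.List.pyRange 0 n 1).map (fun i => (PySem.List.pyRange 0 m 1).map (fun j => f i j))).length := by
    simpa using hi
  have hrow : ((PySem.List.pyRange 0 n 1).map (fun i => (PySem.List.pyRange 0 m 1).map (fun j => f i j))).getD w.1.toNat []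
      = (PySem.List.pyRange 0 m 1).map (fun j => f (PySem.List.pyRange 0 n 1)[w.1.toNat] j) := by
    rw [pv_getD_row _ _ hi']
    simp
  have hidx : (PySem.List.pyRange 0 n 1)[w.1.toNat] = w.1 := by
    rw [PySem.List.getElem_pyRange_one]
    omega
  have hj : w.2.toNat < (PySem.List.pyRange 0 m 1).length := by
    rw [PySem.List.length_pyRange_one]; omega
  have hjdx : (PySem.List.pyRange 0 m 1)[w.2.toNat] = w.2 := by
    rw [PySem.List.getElem_pyRange_one]
    omega
  unfold pvGet2
  rw [hrow, hidx]
  have : ((PySem.List.pyRange 0 m 1).map (fun j => f w.1 j)).getD w.2.toNat 0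
      = f w.1 (PySem.List.pyRange 0 m 1)[w.2.toNat] := by
    rw [List.getD, List.getElem?_map, List.getElem?_eq_getElem hj]
    rfl
  rw [this, hjdx]

lemma pv_shape_mapmap (f : Int → Int → Int) (n m : Int) :
    pvShape n m ((PySem.List.pyRange 0 n 1).map (fun i => (PySem.List.pyRange 0 m 1).map (fun j => f i j))) := by
  constructor
  · simp [PySem.List.length_pyRange_one]
  · intro row hr
    rw [List.mem_map] at hr
    obtain ⟨i, -, rfl⟩ := hr
    simp [PySem.List.length_pyRange_one]

-- matrices of the same shape agreeing on the window are equal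
lemma pv_get2_elem (M : List (List Int)) (i j : Nat) (hi : i < M.length) (hj : j < (M[i]).length) :
    pvGet2 M (i : Int) (j : Int) = M[i][j] := by
  simp [pvGet2, List.getD, hi, hj]

lemma pv_mat_eq (n m : Int) (M N : List (List Int))
    (hM : pvShape n m M) (hN : pvShape n m N)
    (h : ∀ w : Int × Int, pvWin n m w → pvGet2 M w.1 w.2 = pvGet2 N w.1 w.2) : M = N := by
  obtain ⟨hMl, hMr⟩ := hM
  obtain ⟨hNl, hNr⟩ := hN
  apply List.ext_getElem (by rw [hMl, hNl])
  intro i hiM hiN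
  apply List.ext_getElem
  · rw [hMr _ (List.getElem_mem hiM), hNr _ (List.getElem_mem hiN)]
  intro j hjM hjN
  have hwin : pvWin n m ((i : Int), (j : Int)) := by
    refine ⟨by omega, ?_, by omega, ?_⟩
    · have : i < n.toNat := by rw [← hMl]; exact hiM
      omega
    · have : j < m.toNat := by
        rw [← hMr _ (List.getElem_mem hiM)]; exact hjM
      omega
  have e1 := pv_get2_elem M i j hiM hjM
  have e2 := pv_get2_elem N i j hiN hjN
  have := h ((i : Int), (j : Int)) hwin
  simp only at this
  rw [e1, e2] at this
  exact this

-- the neighbour-minimum fold: lower bounds and attainment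
lemma pv_nbrfold (M : List (List Int)) (n m : Int) :
    ∀ (ps : List (Int × Int)) (b : Int),
      ps.foldl (pvNbrFoldF M n m) b ≤ b ∧
      (∀ p ∈ ps, pvWin n m p → ps.foldl (pvNbrFoldF M n m) b ≤ pvGet2 M p.1 p.2) ∧
      (ps.foldl (pvNbrFoldF M n m) b = b ∨
        ∃ p ∈ ps, pvWin n m p ∧ ps.foldl (pvNbrFoldF M n m) b = pvGet2 M p.1 p.2) := by
  intro ps
  induction ps with
  | nil => intro b; exact ⟨le_refl b, by simp, Or.inl rfl⟩
  | cons p ps ih =>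
      intro b
      simp only [List.foldl_cons]
      by_cases hc : 0 ≤ p.1 ∧ p.1 < n ∧ 0 ≤ p.2 ∧ p.2 < m ∧ pvGet2 M p.1 p.2 < b
      · have hbody : pvNbrFoldF M n m b p = pvGet2 M p.1 p.2 := by
          unfold pvNbrFoldF; rw [if_pos hc]
        rw [hbody]
        obtain ⟨i1, i2, i3⟩ := ih (pvGet2 M p.1 p.2)
        refine ⟨by omega, ?_, ?_⟩
        · intro p' hp' hw'
          rcases List.mem_cons.mp hp' with h | h
          · subst h; exact i1
          · exact i2 p' h hw'
        · rcases i3 with h | ⟨p', hp', hw', he⟩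
          · exact Or.inr ⟨p, by simp, ⟨hc.1, hc.2.1, hc.2.2.1, hc.2.2.2.1⟩, h⟩
          · exact Or.inr ⟨p', by simp [hp'], hw', he⟩
      · have hbody : pvNbrFoldF M n m b p = b := by
          unfold pvNbrFoldF; rw [if_neg hc]
        rw [hbody]
        obtain ⟨i1, i2, i3⟩ := ih b
        refine ⟨i1, ?_, ?_⟩
        · intro p' hp' hw'
          rcases List.mem_cons.mp hp' with h | h
          · subst h
            obtain ⟨w1, w2, w3, w4⟩ := hw'
            have : ¬ pvGet2 M p'.1 p'.2 < b := fun hlt => hc ⟨w1, w2, w3, w4, hlt⟩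
            omega
          · exact i2 p' h hw'
        · rcases i3 with h | ⟨p', hp', hw', he⟩
          · exact Or.inl h
          · exact Or.inr ⟨p', by simp [hp'], hw', he⟩

-- the heart: one relaxation sweep performs exactly one BFS level
lemma pv_relaxed_char (grid : List (List Int)) (n m inf d : Int) (dist M : List (List Int))
    (F ws : List (Int × Int))
    (hRel : pvRel grid n m inf d dist M F)
    (hinf : inf = n * m + 1)
    (hb : d + pvUc n m dist ≤ ((n.toNat * m.toNat : Nat) : Int))
    (hws : ∀ w : Int × Int, w ∈ ws ↔ pvWin n m w ∧ pvGet2 grid w.1 w.2 ≠ -1 ∧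
      pvGet2 dist w.1 w.2 = -1 ∧ ∃ c ∈ F, pvAdj c w)
    (w : Int × Int) (hw : pvWin n m w) :
    pvRelaxed grid M n m inf w.1 w.2 = if w ∈ ws then d + 1 else pvGet2 M w.1 w.2 := by
  obtain ⟨hshD, hshM, hd0, hFw, hDisj, hHF, hHexp⟩ := hRel
  -- window nonempty ⇒ the Nat product is the Int product and d < inf
  have hn : 0 < n := lt_of_le_of_lt hw.1 hw.2.1
  have hm : 0 < m := lt_of_le_of_lt hw.2.2.1 hw.2.2.2
  have hnm : ((n.toNat * m.toNat : Nat) : Int) = n * m := by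
    push_cast; rw [Int.toNat_of_nonneg (by omega), Int.toNat_of_nonneg (by omega)]
  have huc0 := pv_uc_nonneg n m dist
  have hdinf : d < inf := by omega
  obtain ⟨nb1, nb2, nb3⟩ := pv_nbrfold M n m (pvNbrs w.1 w.2) inf
  by_cases hg : pvGet2 grid w.1 w.2 = -1
  · have hnw : w ∉ ws := fun hm' => ((hws w).mp hm').2.1 hg
    rw [if_neg hnw]
    unfold pvRelaxed
    rw [if_pos hg]
  · unfold pvRelaxed
    rw [if_neg hg]
    by_cases hmem : w ∈ ws
    · -- newly discovered: the minimum neighbour value is exactly d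
      obtain ⟨-, -, hdv, ⟨c, hcF, hadj⟩⟩ := (hws w).mp hmem
      have hMw : pvGet2 M w.1 w.2 = inf := by
        rcases hDisj w hw with ⟨-, h⟩ | ⟨h0, -, -, -⟩
        · exact h
        · omega
      have hcwin : pvWin n m c := hFw c hcF
      have hcd : pvGet2 dist c.1 c.2 = d := (hHF c hcwin).mpr hcF
      have hMc : pvGet2 M c.1 c.2 = d := by
        rcases hDisj c hcwin with ⟨h, -⟩ | ⟨-, -, h, -⟩
        · omega
        · omega
      have hcmem : c ∈ pvNbrs w.1 w.2 := by
        rw [pv_mem_nbrs]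
        have := pv_adj_symm c w hadj
        cases w; exact this
      have hle : pvNbrMin M n m inf w.1 w.2 ≤ d := by
        have := nb2 c hcmem hcwin
        rw [hMc] at this
        exact this
      have hge : d ≤ pvNbrMin M n m inf w.1 w.2 := by
        rcases nb3 with h | ⟨p, hp, hpwin, he⟩
        · rw [pvNbrMin] at hle ⊢; omega
        · rw [pvNbrMin, he]
          rcases hDisj p hpwin with ⟨-, hMp⟩ | ⟨hp0, hpd, hMp, -⟩
          · rw [hMp]; omega
          · rw [hMp]
            by_contra hlt
            have hpadj : pvAdj p w := by
              apply pv_adj_symm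
              rw [← pv_mem_nbrs w.1 w.2 p]
              exact hp
            have := hHexp p hpwin hp0 (by omega) w hpadj hw hg
            omega
      have heq : pvNbrMin M n m inf w.1 w.2 = d := le_antisymm hle hge
      have hucw : 1 ≤ pvUc n m dist := pv_uc_pos n m dist w hw hdv
      have hlt : pvNbrMin M n m inf w.1 w.2 + 1 < pvGet2 M w.1 w.2 := by
        rw [heq, hMw]; omega
      rw [if_pos hmem, if_pos hlt, heq]
    · rw [if_neg hmem]
      rcases hDisj w hw with ⟨hdv, hMw⟩ | ⟨h0, hled, hMw, -⟩
      · -- still undiscovered: every in-window neighbour is undiscovered too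
        have hbig : ¬ pvNbrMin M n m inf w.1 w.2 + 1 < pvGet2 M w.1 w.2 := by
          rw [hMw]
          rcases nb3 with h | ⟨p, hp, hpwin, he⟩
          · rw [pvNbrMin, h]; omega
          · rw [pvNbrMin, he]
            rcases hDisj p hpwin with ⟨-, hMp⟩ | ⟨hp0, hpd, hMp, -⟩
            · rw [hMp]; omega
            · exfalso
              have hpadj : pvAdj p w := by
                apply pv_adj_symm
                rw [← pv_mem_nbrs w.1 w.2 p]
                exact hp
              by_cases hpd' : pvGet2 dist p.1 p.2 < d
              · have := hHexp p hpwin hp0 hpd' w hpadj hw hg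
                omega
              · have hpeq : pvGet2 dist p.1 p.2 = d := by omega
                have hpF : p ∈ F := (hHF p hpwin).mp hpeq
                exact hmem ((hws w).mpr ⟨hw, hg, hdv, ⟨p, hpF, hpadj⟩⟩)
        rw [if_neg hbig]
      · -- already discovered: no neighbour can improve it
        have hbig : ¬ pvNbrMin M n m inf w.1 w.2 + 1 < pvGet2 M w.1 w.2 := by
          rw [hMw]
          rcases nb3 with h | ⟨p, hp, hpwin, he⟩
          · rw [pvNbrMin, h]; omega
          · rw [pvNbrMin, he]
            rcases hDisj p hpwin with ⟨-, hMp⟩ | ⟨hp0, hpd, hMp, -⟩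
            · rw [hMp]; omega
            · rw [hMp]
              by_contra hlt
              have hpadj : pvAdj p w := by
                apply pv_adj_symm
                rw [← pv_mem_nbrs w.1 w.2 p]
                exact hp
              have := hHexp p hpwin hp0 (by omega) w hpadj hw hg
              omega
        rw [if_neg hbig]

-- stepping the invariant to the next level
lemma pv_rel_step (grid : List (List Int)) (n m inf d : Int) (dist M dist' M' : List (List Int))
    (F ws : List (Int × Int))
    (hRel : pvRel grid n m inf d dist M F)
    (hws : ∀ w : Int × Int, w ∈ ws ↔ pvWin n m w ∧ pvGet2 grid w.1 w.2 ≠ -1 ∧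
      pvGet2 dist w.1 w.2 = -1 ∧ ∃ c ∈ F, pvAdj c w)
    (hshD' : pvShape n m dist')
    (hptD : ∀ w : Int × Int, pvWin n m w →
      pvGet2 dist' w.1 w.2 = if w ∈ ws then d + 1 else pvGet2 dist w.1 w.2)
    (hshM' : pvShape n m M')
    (hptM : ∀ w : Int × Int, pvWin n m w →
      pvGet2 M' w.1 w.2 = if w ∈ ws then d + 1 else pvGet2 M w.1 w.2) :
    pvRel grid n m inf (d + 1) dist' M' ws := by
  obtain ⟨hshD, hshM, hd0, hFw, hDisj, hHF, hHexp⟩ := hRel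
  refine ⟨hshD', hshM', by omega, fun c hc => ((hws c).mp hc).1, ?_, ?_, ?_⟩
  · intro w hw
    rw [hptD w hw, hptM w hw]
    by_cases hmem : w ∈ ws
    · rw [if_pos hmem, if_pos hmem]
      exact Or.inr ⟨by omega, by omega, rfl, ((hws w).mp hmem).2.1⟩
    · rw [if_neg hmem, if_neg hmem]
      rcases hDisj w hw with ⟨h1, h2⟩ | ⟨h1, h2, h3, h4⟩
      · exact Or.inl ⟨h1, h2⟩
      · exact Or.inr ⟨h1, by omega, h3, h4⟩
  · intro w hw
    rw [hptD w hw]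
    by_cases hmem : w ∈ ws
    · simp [hmem]
    · rw [if_neg hmem]
      constructor
      · intro he
        exfalso
        rcases hDisj w hw with ⟨h1, -⟩ | ⟨-, h2, -, -⟩ <;> omega
      · intro h; exact absurd h hmem
  · intro v hvwin hv0 hvlt w hadj hwwin hgw
    rw [hptD v hvwin] at hv0 hvlt ⊢
    rw [hptD w hwwin]
    by_cases hvm : v ∈ ws
    · rw [if_pos hvm] at hvlt; omega
    · rw [if_neg hvm] at hv0 hvlt ⊢
      by_cases hvd : pvGet2 dist v.1 v.2 < d
      · obtain ⟨hw0, hwle⟩ := hHexp v hvwin hv0 hvd w hadj hwwin hgw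
        have hwm : w ∉ ws := by
          intro hm'
          have := ((hws w).mp hm').2.2.1
          omega
        rw [if_neg hwm]
        exact ⟨hw0, hwle⟩
      · have hveq : pvGet2 dist v.1 v.2 = d := by omega
        have hvF : v ∈ F := (hHF v hvwin).mp hveq
        by_cases hwm : w ∈ ws
        · rw [if_pos hwm]; omega
        · rw [if_neg hwm]
          by_cases hwu : pvGet2 dist w.1 w.2 = -1
          · exact absurd ((hws w).mpr ⟨hwwin, hgw, hwu, ⟨v, hvF, hadj⟩⟩) hwm
          · rcases hDisj w hwwin with ⟨h1, -⟩ | ⟨h1, h2, -, -⟩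
            · exact absurd h1 hwu
            · omega

-- A's final summation fold as a window sum
lemma pv_sumA_eq (grid : List (List Int)) (n m : Int) (dist : List (List Int)) :
    (PySem.List.pyRange 0 n 1).foldl (fun total i =>
      (PySem.List.pyRange 0 m 1).foldl (fun total j =>
        if pvGet2 grid i j = 1 ∧ pvGet2 dist i j ≠ -1 then total + pvGet2 dist i j else total)
        total) 0
    = ((pvWinL n m).map (fun w =>
        if pvGet2 grid w.1 w.2 = 1 ∧ pvGet2 dist w.1 w.2 ≠ -1 then pvGet2 dist w.1 w.2 else 0)).sum := by
  have h1 := pv_foldl2 n m (fun (total : Int) (w : Int × Int) =>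
    if pvGet2 grid w.1 w.2 = 1 ∧ pvGet2 dist w.1 w.2 ≠ -1 then total + pvGet2 dist w.1 w.2 else total) 0
  rw [h1]
  have h2 : ∀ (acc : Int) (w : Int × Int), w ∈ pvWinL n m →
      (if pvGet2 grid w.1 w.2 = 1 ∧ pvGet2 dist w.1 w.2 ≠ -1 then acc + pvGet2 dist w.1 w.2 else acc)
        = acc + (if pvGet2 grid w.1 w.2 = 1 ∧ pvGet2 dist w.1 w.2 ≠ -1 then pvGet2 dist w.1 w.2 else 0) := by
    intro acc w _
    split <;> simp
  rw [PySem.List.foldl_congr_mem (pvWinL n m) _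
      (fun (acc : Int) (w : Int × Int) =>
        acc + (if pvGet2 grid w.1 w.2 = 1 ∧ pvGet2 dist w.1 w.2 ≠ -1 then pvGet2 dist w.1 w.2 else 0)) 0 h2,
    PySem.List.foldl_add]
  simp

-- B's nested comprehension sum as a window sum
lemma pv_sumB_eq (n m : Int) (g : Int → Int → Int) :
    ((PySem.List.pyRange 0 n 1).map (fun i => ((PySem.List.pyRange 0 m 1).map (fun j => g i j)).sum)).sum
      = ((pvWinL n m).map (fun w => g w.1 w.2)).sum := by
  rw [pvWinL, List.map_flatMap]
  induction (PySem.List.pyRange 0 n 1) with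
  | nil => simp
  | cons i L ih =>
      simp only [List.map_cons, List.sum_cons, List.flatMap_cons, List.sum_append, ih,
        List.map_map]
      rfl

-- main simulation: A's remaining BFS run and B's remaining relaxation run give the same answer
lemma pv_mainSim (grid : List (List Int)) (n m inf : Int) (hinf : inf = n * m + 1) :
    ∀ (fb : Nat) (d : Int) (dist M : List (List Int)) (F : List (Int × Int)) (fa : Nat),
    pvRel grid n m inf d dist M F →
    d + pvUc n m dist ≤ ((n.toNat * m.toNat : Nat) : Int) →
    (F.length : Int) + 2 * pvUc n m dist ≤ (fa : Int) →
    pvUc n m dist + 1 ≤ (fb : Int) →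
    ((pvWinL n m).map (fun w =>
      if pvGet2 grid w.1 w.2 = 1 ∧ pvGet2 (pvLoopA grid n m fa F dist) w.1 w.2 ≠ -1
      then pvGet2 (pvLoopA grid n m fa F dist) w.1 w.2 else 0)).sum
    = ((pvWinL n m).map (fun w =>
      if pvGet2 grid w.1 w.2 = 1 ∧ pvGet2 (pvJacobi grid n m inf fb M) w.1 w.2 < inf
      then pvGet2 (pvJacobi grid n m inf fb M) w.1 w.2 else 0)).sum := by
  intro fb
  induction fb with
  | zero =>
      intro d dist M F fa hRel hb hfa hfb
      exfalso
      have := pv_uc_nonneg n m dist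
      simp at hfb
      omega
  | succ fb ih =>
      intro d dist M F fa hRel hb hfa hfb
      have hRel' := hRel
      obtain ⟨hshD, hshM, hd0, hFw, hDisj, hHF, hHexp⟩ := hRel'
      have hFd : ∀ c ∈ F, pvWin n m c ∧ pvGet2 dist c.1 c.2 = d := by
        intro c hc
        exact ⟨hFw c hc, (hHF c (hFw c hc)).mpr hc⟩
      obtain ⟨ws, s1, s2, s3, s4, s5, s6⟩ := pv_seqChar grid n m d F dist hshD hFd hd0
      -- ws is exactly the set of newly reachable cells
      have hwsIff : ∀ w : Int × Int, w ∈ ws ↔ pvWin n m w ∧ pvGet2 grid w.1 w.2 ≠ -1 ∧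
          pvGet2 dist w.1 w.2 = -1 ∧ ∃ c ∈ F, pvAdj c w := by
        intro w
        constructor
        · exact s4 w
        · rintro ⟨hwwin, hwg, hwu, ⟨c, hcF, hadj⟩⟩
          have hne := s6 c hcF w hadj hwwin hwg
          have := s5 w hwwin
          by_cases hm' : w ∈ ws
          · exact hm'
          · rw [if_neg hm'] at this
            rw [this] at hne
            exact absurd hwu hne
      -- the sweep is M updated on ws
      have hswShape : pvShape n m (pvSweep grid n m inf M) := pv_shape_mapmap _ n m
      have hswPt : ∀ w : Int × Int, pvWin n m w →
          pvGet2 (pvSweep grid n m inf M) w.1 w.2 = if w ∈ ws then d + 1 else pvGet2 M w.1 w.2 := by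
        intro w hw
        unfold pvSweep
        rw [pv_get2_mapmap (fun i j => pvRelaxed grid M n m inf i j) n m w hw]
        exact pv_relaxed_char grid n m inf d dist M F ws hRel hinf hb hwsIff w hw
      -- A runs one whole level
      have huc0 := pv_uc_nonneg n m dist
      have hFlen : F.length ≤ fa := by omega
      have hreo := pv_reorder grid n m F [] dist fa hFlen
      rw [List.append_nil, s1, List.nil_append] at hreo
      by_cases hcase : ws = []
      · -- ws is empty: fixpoint
          -- fixpoint reached: both sides stop with equal matrices
          subst hcase
          have hswEq : pvSweep grid n m inf M = M := by
            apply pv_mat_eq n m _ _ hswShape hshM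
            intro w hw
            rw [hswPt w hw]
            simp
          have hJac : pvJacobi grid n m inf (fb + 1) M = M := by
            unfold pvJacobi
            rw [if_pos hswEq]
          have hDistEq : ∀ w : Int × Int, pvWin n m w →
              pvGet2 (pvSeqA grid n m F dist).1 w.1 w.2 = pvGet2 dist w.1 w.2 := by
            intro w hw
            rw [s5 w hw]
            simp
          have hLoopEnd : pvLoopA grid n m (fa - F.length) [] (pvSeqA grid n m F dist).1
              = (pvSeqA grid n m F dist).1 := by
            cases (fa - F.length) <;> rfl
          rw [hreo, hLoopEnd, hJac]
          refine congrArg List.sum (List.map_congr_left ?_)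
          intro w hwm
          have hw := (pv_mem_winL n m w).mp hwm
          have hn : 0 < n := lt_of_le_of_lt hw.1 hw.2.1
          have hm' : 0 < m := lt_of_le_of_lt hw.2.2.1 hw.2.2.2
          have hnm : ((n.toNat * m.toNat : Nat) : Int) = n * m := by
            push_cast; rw [Int.toNat_of_nonneg (by omega), Int.toNat_of_nonneg (by omega)]
          rw [hDistEq w hw]
          rcases hDisj w hw with ⟨h1, h2⟩ | ⟨h1, h2, h3, h4⟩
          · rw [h1, h2]
            simp
          · rw [h3]
            have hlt : pvGet2 dist w.1 w.2 < inf := by omega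
            have hne : pvGet2 dist w.1 w.2 ≠ -1 := by omega
            simp [hlt, hne]
      · -- at least one cell was discovered: both sides advance one level
          obtain ⟨w0, hw0⟩ := List.exists_mem_of_ne_nil ws hcase
          obtain ⟨hw0win, hw0g, hw0u, -⟩ := s4 w0 hw0
          have hn : 0 < n := lt_of_le_of_lt hw0win.1 hw0win.2.1
          have hm' : 0 < m := lt_of_le_of_lt hw0win.2.2.1 hw0win.2.2.2
          have hnm : ((n.toNat * m.toNat : Nat) : Int) = n * m := by
            push_cast; rw [Int.toNat_of_nonneg (by omega), Int.toNat_of_nonneg (by omega)]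
          have hM0 : pvGet2 M w0.1 w0.2 = inf := by
            rcases hDisj w0 hw0win with ⟨-, h⟩ | ⟨h, -, -, -⟩
            · exact h
            · omega
          have hucpos : 1 ≤ pvUc n m dist := pv_uc_pos n m dist w0 hw0win hw0u
          have hswNe : pvSweep grid n m inf M ≠ M := by
            intro he
            have h1 := hswPt w0 hw0win
            rw [he, if_pos hw0, hM0] at h1
            omega
          have hJac : pvJacobi grid n m inf (fb + 1) M = pvJacobi grid n m inf fb (pvSweep grid n m inf M) := by
            show (if pvSweep grid n m inf M = M then M else pvJacobi grid n m inf fb (pvSweep grid n m inf M)) = _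
            rw [if_neg hswNe]
          -- new invariant
          have hws4 : ∀ w ∈ ws, pvWin n m w ∧ pvGet2 dist w.1 w.2 = -1 := by
            intro w hw
            exact ⟨(s4 w hw).1, (s4 w hw).2.2.1⟩
          have hucstep := pv_uc_step n m dist (pvSeqA grid n m F dist).1 ws d hd0 s3 hws4 s5
          have hRelNew := pv_rel_step grid n m inf d dist M (pvSeqA grid n m F dist).1
            (pvSweep grid n m inf M) F ws hRel hwsIff s2 s5 hswShape hswPt
          have hwslen : 1 ≤ (ws.length : Int) := by
            have := List.length_pos_iff.mpr hcase
            omega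
          have hwslen2 : (ws.length : Int) ≤ pvUc n m dist := by
            have := pv_uc_nonneg n m (pvSeqA grid n m F dist).1
            omega
          rw [hreo, hJac]
          exact ih (d + 1) (pvSeqA grid n m F dist).1 (pvSweep grid n m inf M) ws
            (fa - F.length) hRelNew
            (by rw [hucstep]; omega)
            (by rw [hucstep]; omega)
            (by rw [hucstep]; push_cast [Nat.succ_eq_add_one] at hfb ⊢; omega)

-- ===== VERDICT (by name: the statement is the Claim_ definition above) =====
theorem min_total_distance_spec : Claim_equal_min_total_distance := by
  intro grid n m _ _
  unfold Spec_min_total_distance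
  show min_total_distance grid n m = min_total_distance_alt grid n m
  simp only [min_total_distance, min_total_distance_alt]
  by_cases hg : (!pvHasVal grid 1 || !pvHasVal grid 0) = true
  · rw [if_pos hg, if_pos hg]
  · rw [if_neg hg, if_neg hg]
    -- characterise the seed
    have hseedA : pvSeedA grid n m (List.replicate n.toNat (List.replicate m.toNat (-1)))
        = (pvWinL n m).foldl
            (fun st c => if pvGet2 grid c.1 c.2 = 0 then (pvSet2 st.1 c.1 c.2 0, st.2 ++ [c]) else st)
            (List.replicate n.toNat (List.replicate m.toNat (-1)), []) := by
      unfold pvSeedA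
      exact pv_foldl2 n m
        (fun st c => if pvGet2 grid c.1 c.2 = 0 then (pvSet2 st.1 c.1 c.2 0, st.2 ++ [c]) else st)
        (List.replicate n.toNat (List.replicate m.toNat (-1)), [])
    obtain ⟨e1, e2, e3⟩ := pv_seedChar grid n m (pvWinL n m)
      (fun c hc => (pv_mem_winL n m c).mp hc)
      (List.replicate n.toNat (List.replicate m.toNat (-1))) [] (pv_shape_replicate n m)
    rw [hseedA]
    set seeded := (pvWinL n m).foldl
        (fun st c => if pvGet2 grid c.1 c.2 = 0 then (pvSet2 st.1 c.1 c.2 0, st.2 ++ [c]) else st)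
        (List.replicate n.toNat (List.replicate m.toNat (-1)), []) with hseed
    have hptSeed : ∀ w : Int × Int, pvWin n m w →
        pvGet2 seeded.1 w.1 w.2 = if pvGet2 grid w.1 w.2 = 0 then 0 else -1 := by
      intro w hw
      rw [e3 w hw, pv_get2_replicate n m w hw]
      by_cases h0 : pvGet2 grid w.1 w.2 = 0
      · rw [if_pos ⟨(pv_mem_winL n m w).mpr hw, h0⟩, if_pos h0]
      · rw [if_neg (fun h => h0 h.2), if_neg h0]
    have hq : seeded.2 = (pvWinL n m).filter (fun c => pvGet2 grid c.1 c.2 == 0) := by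
      rw [e2]
      simp
    -- the initial relation
    have hRel0 : pvRel grid n m (n * m + 1) 0 seeded.1
        ((PySem.List.pyRange 0 n 1).map (fun i =>
          (PySem.List.pyRange 0 m 1).map (fun j => if pvGet2 grid i j = 0 then 0 else n * m + 1)))
        seeded.2 := by
      refine ⟨e1, pv_shape_mapmap _ n m, le_refl 0, ?_, ?_, ?_, ?_⟩
      · intro c hc
        rw [hq] at hc
        exact (pv_mem_winL n m c).mp (List.mem_of_mem_filter hc)
      · intro w hw
        rw [hptSeed w hw,
          pv_get2_mapmap (fun i j => if pvGet2 grid i j = 0 then 0 else n * m + 1) n m w hw]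
        by_cases h0 : pvGet2 grid w.1 w.2 = 0
        · rw [if_pos h0, if_pos h0]
          exact Or.inr ⟨le_refl 0, le_refl 0, rfl, by omega⟩
        · rw [if_neg h0, if_neg h0]
          exact Or.inl ⟨rfl, rfl⟩
      · intro w hw
        rw [hptSeed w hw, hq, List.mem_filter]
        by_cases h0 : pvGet2 grid w.1 w.2 = 0
        · simp [h0, (pv_mem_winL n m w).mpr hw]
        · simp [h0]
      · intro v hv hv0 hvlt
        rw [hptSeed v hv] at hv0 hvlt
        split_ifs at hvlt <;> omega
    have hmain := pv_mainSim grid n m (n * m + 1) rfl (n.toNat * m.toNat + 1) 0 seeded.1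
      ((PySem.List.pyRange 0 n 1).map (fun i =>
        (PySem.List.pyRange 0 m 1).map (fun j => if pvGet2 grid i j = 0 then 0 else n * m + 1)))
      seeded.2 (seeded.2.length + 2 * (n.toNat * m.toNat)) hRel0
      (by have := pv_uc_le n m seeded.1; omega)
      (by have := pv_uc_le n m seeded.1; push_cast; omega)
      (by have := pv_uc_le n m seeded.1; push_cast; omega)
    rw [pv_sumA_eq grid n m _, hmain,
      pv_sumB_eq n m (fun i j =>
        if pvGet2 grid i j = 1 ∧
           pvGet2 (pvJacobi grid n m (n * m + 1) (n.toNat * m.toNat + 1)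
             ((PySem.List.pyRange 0 n 1).map (fun i =>
               (PySem.List.pyRange 0 m 1).map (fun j => if pvGet2 grid i j = 0 then 0 else n * m + 1)))) i j < n * m + 1
        then pvGet2 (pvJacobi grid n m (n * m + 1) (n.toNat * m.toNat + 1)
             ((PySem.List.pyRange 0 n 1).map (fun i =>
               (PySem.List.pyRange 0 m 1).map (fun j => if pvGet2 grid i j = 0 then 0 else n * m + 1)))) i j
        else 0)]
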